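-- pv_equiv track=rewrite | github.com/chrismoroney/advent-of-code-2024 | Q13/code_part1.py | check_valid_machines
-- ===== SOURCE A (Python) =====
-- from collections import defaultdict
--
-- def check_valid_machines(a_button, b_button, prize):
--     map_idx_to_win_prize = defaultdict(set)
--
--     for i in range(len(a_button)):
--         for x in range(1, 101):
--             for y in range(1, 101):
--                 if a_button[i][0] * x + b_button[i][0] * y == prize[i][0]:
--                     if a_button[i][1] * x + b_button[i][1] * y == prize[i][1]:
--                         map_idx_to_win_prize[i].add((x, y))
--     return map_idx_to_win_prize
-- ===== SOURCE B (Python) =====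
-- def _solutions_for_x(a0, a1, b0, b1, p0, p1, x):
--     # solve a0*x + b0*y == p0 and a1*x + b1*y == p1 for y in [1,100], x fixed
--     r0 = p0 - a0 * x
--     if b0 != 0:
--         if r0 % b0 == 0:
--             y = r0 // b0
--             if 1 <= y <= 100 and a1 * x + b1 * y == p1:
--                 return [(x, y)]
--         return []
--     if r0 == 0:
--         r1 = p1 - a1 * x
--         if b1 != 0:
--             if r1 % b1 == 0:
--                 y = r1 // b1
--                 if 1 <= y <= 100:
--                     return [(x, y)]
--             return []
--         if r1 == 0:
--             return [(x, y) for y in range(1, 101)]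
--     return []
--
--
-- def check_valid_machines(a_button, b_button, prize):
--     result = {}
--     for i in range(len(a_button)):
--         a0, a1 = a_button[i][0], a_button[i][1]
--         b0, b1 = b_button[i][0], b_button[i][1]
--         p0, p1 = prize[i][0], prize[i][1]
--         sols = []
--         for x in range(1, 101):
--             sols += _solutions_for_x(a0, a1, b0, b1, p0, p1, x)
--         if sols:
--             result[i] = set(sols)
--     return result
-- ===== Notes on version B (the rewrite author's own statement) =====
-- stated objective: faster
-- what changed: A brute-forces all 100x100 (x,y) pairs per machine; B scans x only and solves the linear equations for y directly (division/divisibility, with explicit handling of the degenerate zero-coefficient cases), removing the inner 100-iteration scan.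
-- outside the precondition, e.g. on check_valid_machines([[1]], [[1]], [[0]]): A returns {}, B raises IndexError
import Mathlib
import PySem

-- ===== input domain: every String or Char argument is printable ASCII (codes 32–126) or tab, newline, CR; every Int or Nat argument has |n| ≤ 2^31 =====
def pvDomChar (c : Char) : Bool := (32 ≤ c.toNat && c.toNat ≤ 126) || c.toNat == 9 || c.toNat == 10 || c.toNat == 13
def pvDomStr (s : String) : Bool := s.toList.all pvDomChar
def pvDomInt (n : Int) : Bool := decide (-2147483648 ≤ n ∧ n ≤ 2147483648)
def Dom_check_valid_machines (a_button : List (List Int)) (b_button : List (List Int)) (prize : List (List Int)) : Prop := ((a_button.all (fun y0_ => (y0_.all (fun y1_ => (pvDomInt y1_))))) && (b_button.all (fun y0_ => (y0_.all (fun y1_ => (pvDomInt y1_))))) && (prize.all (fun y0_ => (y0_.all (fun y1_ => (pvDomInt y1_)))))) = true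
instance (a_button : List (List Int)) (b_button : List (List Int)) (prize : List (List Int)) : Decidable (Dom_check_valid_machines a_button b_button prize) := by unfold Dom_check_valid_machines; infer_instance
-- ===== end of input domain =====

-- B replaces A's brute-force scan over all (x,y) in [1,100]^2 by a scan over x alone,
-- solving each linear equation for y by exact division (degenerate zero coefficients handled
-- explicitly); the timing objective is a constant-factor speed-up (the inner 100-step loop disappears).


-- shared indexing helper: m[i][j] (total form of the Python indexing; exact under Pre_)
def pvAt (m : List (List Int)) (i j : Int) : Int :=
  PySem.List.pyGetD (PySem.List.pyGetD m i []) j 0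

-- ===== PORT A =====
def check_valid_machines (a_button : List (List Int)) (b_button : List (List Int)) (prize : List (List Int)) : List (Int × List (Int × Int)) :=
  ((PySem.List.pyRange 0 (PySem.List.len a_button) 1).foldl (fun d i =>
    (PySem.List.pyRange 1 101 1).foldl (fun d x =>
      (PySem.List.pyRange 1 101 1).foldl (fun d y =>
        if pvAt a_button i 0 * x + pvAt b_button i 0 * y == pvAt prize i 0 then
          if pvAt a_button i 1 * x + pvAt b_button i 1 * y == pvAt prize i 1 then
            PySem.Dict.modify d i [] (fun s => PySem.Set.add s (x, y))
          else d
        else d) d) d)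
    (PySem.Dict.empty : PySem.Dict Int (List (Int × Int)))).items

-- ===== PORT B =====
-- port of Source B's _solutions_for_x: the solutions (x,y), y in [1,100], of the 2 equations for this fixed x
def pvSolutionsForX (a0 a1 b0 b1 p0 p1 x : Int) : List (Int × Int) :=
  let r0 := p0 - a0 * x
  if b0 ≠ 0 then
    (if PySem.Int.mod r0 b0 == 0 then
      let y := PySem.Int.floordiv r0 b0
      if 1 ≤ y ∧ y ≤ 100 ∧ a1 * x + b1 * y == p1 then [(x, y)] else []
    else [])
  else if r0 == 0 then
    let r1 := p1 - a1 * x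
    if b1 ≠ 0 then
      (if PySem.Int.mod r1 b1 == 0 then
        let y := PySem.Int.floordiv r1 b1
        if 1 ≤ y ∧ y ≤ 100 then [(x, y)] else []
      else [])
    else if r1 == 0 then (PySem.List.pyRange 1 101 1).map (fun y => (x, y)) else []
  else []

def check_valid_machines_alt (a_button : List (List Int)) (b_button : List (List Int)) (prize : List (List Int)) : List (Int × List (Int × Int)) :=
  ((PySem.List.pyRange 0 (PySem.List.len a_button) 1).foldl (fun d i =>
    let a0 := pvAt a_button i 0
    let a1 := pvAt a_button i 1
    let b0 := pvAt b_button i 0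
    let b1 := pvAt b_button i 1
    let p0 := pvAt prize i 0
    let p1 := pvAt prize i 1
    let sols := (PySem.List.pyRange 1 101 1).foldl
      (fun sols x => sols ++ pvSolutionsForX a0 a1 b0 b1 p0 p1 x) []
    if sols.isEmpty then d else PySem.Dict.insert d i (PySem.Set.ofList sols))
    (PySem.Dict.empty : PySem.Dict Int (List (Int × Int)))).items

-- ===== PRECONDITION & SPEC =====
-- Pre_ requires every machine row (up to len(a_button)) to have both coordinates; A reads
-- index 1 of a row lazily, so on some short-row inputs A still returns (B raises IndexError
-- there) — those ragged inputs are excluded because in general A raises IndexError on them.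
def Pre_check_valid_machines (a_button : List (List Int)) (b_button : List (List Int)) (prize : List (List Int)) : Prop :=
  ∀ i < a_button.length, 2 ≤ (a_button.getD i []).length ∧
    i < b_button.length ∧ 2 ≤ (b_button.getD i []).length ∧
    i < prize.length ∧ 2 ≤ (prize.getD i []).length
instance (a_button : List (List Int)) (b_button : List (List Int)) (prize : List (List Int)) : Decidable (Pre_check_valid_machines a_button b_button prize) := by unfold Pre_check_valid_machines; infer_instance

def pvWitness_check_valid_machines : List (List Int) × List (List Int) × List (List Int) :=
  ([[1, 0], [2, 1]], [[0, 1], [1, 1]], [[3, 4], [10, 20]])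

def Spec_check_valid_machines (a_button : List (List Int)) (b_button : List (List Int)) (prize : List (List Int)) (out : List (Int × List (Int × Int))) : Prop := out = check_valid_machines_alt a_button b_button prize
instance (a_button : List (List Int)) (b_button : List (List Int)) (prize : List (List Int)) (out : List (Int × List (Int × Int))) : Decidable (Spec_check_valid_machines a_button b_button prize out) := by unfold Spec_check_valid_machines; infer_instance

-- ===== CLAIM (what is proved, stated in full; the proofs are below) =====
def Claim_equal_check_valid_machines : Prop := ∀ (a_button : List (List Int)) (b_button : List (List Int)) (prize : List (List Int)), Dom_check_valid_machines a_button b_button prize → Pre_check_valid_machines a_button b_button prize → Spec_check_valid_machines a_button b_button prize (check_valid_machines a_button b_button prize)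

-- ===== LEMMAS AND PROOFS =====

-- the two-equation test A applies to a candidate pair, and the per-machine solution list
def pvCond (a0 a1 b0 b1 p0 p1 x y : Int) : Bool :=
  (a0 * x + b0 * y == p0) && (a1 * x + b1 * y == p1)

def pvSols (a0 a1 b0 b1 p0 p1 : Int) : List (Int × Int) :=
  (PySem.List.pyRange 1 101 1).flatMap (fun x => pvSolutionsForX a0 a1 b0 b1 p0 p1 x)

-- generic loop-shape lemmas
lemma pv_foldl_if_if {γ : Type} (l : List Int) (c1 c2 : Int → Bool) (g : γ → Int → γ) (d : γ) :
    l.foldl (fun d y => if c1 y then (if c2 y then g d y else d) else d) d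
      = (l.filter (fun y => c1 y && c2 y)).foldl g d := by
  induction l generalizing d with
  | nil => rfl
  | cons h t ih =>
      cases hc1 : c1 h <;> cases hc2 : c2 h <;>
        simp [hc1, hc2, ih]

lemma pv_foldl_foldl_flatMap {α β γ : Type} (l : List α) (h : α → List β) (f : γ → β → γ) (d : γ) :
    l.foldl (fun d x => (h x).foldl f d) d = (l.flatMap h).foldl f d := by
  induction l generalizing d with
  | nil => rfl
  | cons a t ih => simp [List.flatMap_cons, List.foldl_append, ih]

lemma pv_filter_nodup_singleton {α : Type} [DecidableEq α] {l : List α} (hl : l.Nodup) (p : α → Bool) (e : α)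
    (h : ∀ y ∈ l, p y = true → y = e) :
    l.filter p = if e ∈ l ∧ p e = true then [e] else [] := by
  induction l with
  | nil => simp
  | cons hd tl ih =>
      have hnd := (List.nodup_cons.mp hl).1
      have htl := (List.nodup_cons.mp hl).2
      cases hp : p hd with
      | true =>
          have he : hd = e := h hd (by simp) hp
          subst he
          have : tl.filter p = [] := by
            apply List.filter_eq_nil_iff.mpr
            intro y hy hpy
            exact absurd ((h y (by simp [hy]) hpy) ▸ hy) hnd
          simp [hp, this]
      | false =>
          rw [List.filter_cons_of_neg (by simp [hp]),
              ih htl (fun y hy hpy => h y (List.mem_cons_of_mem _ hy) hpy)]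
          by_cases hpe : p e = true
          · by_cases hmem : e ∈ tl
            · simp [hmem, hpe]
            · have hne : e ≠ hd := by rintro rfl; simp [hp] at hpe
              simp [hmem, hpe, hne]
          · simp [hpe]

lemma pv_exact_div {r b : Int} (_hb : b ≠ 0) (hm : PySem.Int.mod r b = 0) :
    b * PySem.Int.floordiv r b = r := by
  have := PySem.Int.floordiv_mul_add_mod r b
  rw [hm] at this
  linarith [this, mul_comm (PySem.Int.floordiv r b) b]

-- THE CORE: for a fixed x, A's inner y-scan finds exactly B's directly computed candidates
lemma pv_cand (a0 a1 b0 b1 p0 p1 x : Int) :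
    ((PySem.List.pyRange 1 101 1).filter (fun y => pvCond a0 a1 b0 b1 p0 p1 x y)).map
        (fun y => (x, y))
      = pvSolutionsForX a0 a1 b0 b1 p0 p1 x := by
  have hnd := PySem.List.nodup_pyRange_one 1 101
  by_cases hb0 : b0 = 0
  · by_cases hr0 : p0 - a0 * x = 0
    · have heq1 : ∀ y : Int, (a0 * x + b0 * y == p0) = true := by
        intro y; simp [hb0]; omega
      by_cases hb1 : b1 = 0
      · by_cases hr1 : p1 - a1 * x = 0
        · have : ∀ y ∈ PySem.List.pyRange 1 101 1, pvCond a0 a1 b0 b1 p0 p1 x y = true := by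
            intro y _; simp [pvCond, heq1, hb1]; omega
          rw [List.filter_eq_self.mpr this]
          simp [pvSolutionsForX, hb0, hr0, hb1, hr1]
        · have : (PySem.List.pyRange 1 101 1).filter (fun y => pvCond a0 a1 b0 b1 p0 p1 x y) = [] := by
            apply List.filter_eq_nil_iff.mpr
            intro y _ hy
            simp [pvCond, hb1] at hy
            omega
          rw [this]
          simp [pvSolutionsForX, hb0, hr0, hb1, hr1]
      · by_cases hm1 : PySem.Int.mod (p1 - a1 * x) b1 = 0
        · set y1 := PySem.Int.floordiv (p1 - a1 * x) b1 with hy1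
          have hex : b1 * y1 = p1 - a1 * x := pv_exact_div hb1 hm1
          have huniq : ∀ y ∈ PySem.List.pyRange 1 101 1,
              pvCond a0 a1 b0 b1 p0 p1 x y = true → y = y1 := by
            intro y _ hy
            simp [pvCond] at hy
            have : b1 * y = b1 * y1 := by omega
            exact mul_left_cancel₀ hb1 this
          have hiff : (y1 ∈ PySem.List.pyRange 1 101 1 ∧ pvCond a0 a1 b0 b1 p0 p1 x y1 = true)
              ↔ (1 ≤ y1 ∧ y1 ≤ 100) := by
            simp [PySem.List.mem_pyRange_one, pvCond, heq1]
            omega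
          rw [pv_filter_nodup_singleton hnd _ y1 huniq]
          by_cases hc : 1 ≤ y1 ∧ y1 ≤ 100
          · rw [if_pos (hiff.mpr hc)]
            simp [pvSolutionsForX, hb0, hr0, hb1, hm1, ← hy1, hc.1, hc.2]
          · rw [if_neg (fun hh => hc (hiff.mp hh))]
            simp [pvSolutionsForX, hb0, hr0, hb1, hm1, ← hy1]
            intro h1
            omega
        · have : (PySem.List.pyRange 1 101 1).filter (fun y => pvCond a0 a1 b0 b1 p0 p1 x y) = [] := by
            apply List.filter_eq_nil_iff.mpr
            intro y _ hy
            simp [pvCond] at hy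
            have : b1 ∣ (p1 - a1 * x) := ⟨y, by omega⟩
            exact hm1 ((PySem.Int.mod_eq_zero_iff_dvd _ _).mpr this)
          rw [this]
          simp [pvSolutionsForX, hb0, hr0, hb1, hm1]
    · have : (PySem.List.pyRange 1 101 1).filter (fun y => pvCond a0 a1 b0 b1 p0 p1 x y) = [] := by
        apply List.filter_eq_nil_iff.mpr
        intro y _ hy
        simp [pvCond, hb0] at hy
        omega
      rw [this]
      simp [pvSolutionsForX, hb0, hr0]
  · by_cases hm0 : PySem.Int.mod (p0 - a0 * x) b0 = 0
    · set y0 := PySem.Int.floordiv (p0 - a0 * x) b0 with hy0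
      have hex : b0 * y0 = p0 - a0 * x := pv_exact_div hb0 hm0
      have huniq : ∀ y ∈ PySem.List.pyRange 1 101 1,
          pvCond a0 a1 b0 b1 p0 p1 x y = true → y = y0 := by
        intro y _ hy
        simp [pvCond] at hy
        have : b0 * y = b0 * y0 := by omega
        exact mul_left_cancel₀ hb0 this
      have hiff : (y0 ∈ PySem.List.pyRange 1 101 1 ∧ pvCond a0 a1 b0 b1 p0 p1 x y0 = true)
          ↔ (1 ≤ y0 ∧ y0 ≤ 100 ∧ (a1 * x + b1 * y0 == p1) = true) := by
        simp [PySem.List.mem_pyRange_one, pvCond]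
        omega
      rw [pv_filter_nodup_singleton hnd _ y0 huniq]
      by_cases hc : 1 ≤ y0 ∧ y0 ≤ 100 ∧ (a1 * x + b1 * y0 == p1) = true
      · rw [if_pos (hiff.mpr hc)]
        simp [pvSolutionsForX, hb0, hm0, ← hy0, hc.1, hc.2.1, hc.2.2]
      · rw [if_neg (fun hh => hc (hiff.mp hh))]
        simp only [beq_iff_eq] at hc
        simp [pvSolutionsForX, hb0, hm0, ← hy0]
        intro h1 h2 h3
        exact hc ⟨h1, h2, h3⟩
    · have : (PySem.List.pyRange 1 101 1).filter (fun y => pvCond a0 a1 b0 b1 p0 p1 x y) = [] := by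
        apply List.filter_eq_nil_iff.mpr
        intro y _ hy
        simp [pvCond] at hy
        have : b0 ∣ (p0 - a0 * x) := ⟨y, by omega⟩
        exact hm0 ((PySem.Int.mod_eq_zero_iff_dvd _ _).mpr this)
      rw [this]
      simp [pvSolutionsForX, hb0, hm0]

-- the dict built by repeatedly modifying a key sitting at the end
lemma pv_modify_fold_end (L : List (Int × Int)) (items : List (Int × List (Int × Int))) (i : Int)
    (s : List (Int × Int)) (h : ∀ p ∈ items, p.1 ≠ i) :
    L.foldl (fun d el => PySem.Dict.modify d i [] (fun s => PySem.Set.add s el))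
        (⟨items ++ [(i, s)]⟩ : PySem.Dict Int (List (Int × Int)))
      = ⟨items ++ [(i, L.foldl PySem.Set.add s)]⟩ := by
  induction L generalizing s with
  | nil => rfl
  | cons e t ih =>
      have hfind : items.find? (fun p => p.1 == i) = none := by
        apply List.find?_eq_none.mpr
        intro p hp
        simp [h p hp]
      have hfind2 : (items ++ [(i, s)]).find? (fun p => p.1 == i) = some (i, s) := by
        rw [List.find?_append, hfind]; simp
      have hany : (items ++ [(i, s)]).any (fun p => p.1 == i) = true := by simp
      have hmod : PySem.Dict.modify (⟨items ++ [(i, s)]⟩ : PySem.Dict Int (List (Int × Int))) i []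
            (fun s => PySem.Set.add s e) = ⟨items ++ [(i, PySem.Set.add s e)]⟩ := by
        simp only [PySem.Dict.modify, PySem.Dict.insert, PySem.Dict.getD, PySem.Dict.get?,
                   PySem.Dict.contains, hfind2, hany, Option.map_some, Option.getD_some, if_true]
        congr 1
        rw [List.map_append]
        congr 1
        · conv_rhs => rw [← List.map_id items]
          apply List.map_congr_left
          intro p hp
          simp [h p hp]
        · simp
      simp only [List.foldl_cons, hmod, ih]

lemma pv_modify_fold (L : List (Int × Int)) (items : List (Int × List (Int × Int))) (i : Int)
    (h : ∀ p ∈ items, p.1 ≠ i) :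
    L.foldl (fun d el => PySem.Dict.modify d i [] (fun s => PySem.Set.add s el))
        (⟨items⟩ : PySem.Dict Int (List (Int × Int)))
      = if L.isEmpty then ⟨items⟩ else ⟨items ++ [(i, L.foldl PySem.Set.add [])]⟩ := by
  cases L with
  | nil => rfl
  | cons e t =>
      have hfind : items.find? (fun p => p.1 == i) = none := by
        apply List.find?_eq_none.mpr
        intro p hp
        simp [h p hp]
      have hany : items.any (fun p => p.1 == i) = false := by
        simp only [List.any_eq_false]
        intro p hp
        simp [h p hp]
      have hmod : PySem.Dict.modify (⟨items⟩ : PySem.Dict Int (List (Int × Int))) i []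
            (fun s => PySem.Set.add s e) = ⟨items ++ [(i, PySem.Set.add [] e)]⟩ := by
        simp only [PySem.Dict.modify, PySem.Dict.insert, PySem.Dict.getD, PySem.Dict.get?,
                   PySem.Dict.contains, hfind, hany, Option.map_none, Option.getD_none,
                   Bool.false_eq_true, if_false]
      simp only [List.foldl_cons, hmod, pv_modify_fold_end t items i _ h, List.isEmpty_cons]
      rfl

lemma pv_insert_fresh (items : List (Int × List (Int × Int))) (i : Int) (v : List (Int × Int))
    (h : ∀ p ∈ items, p.1 ≠ i) :
    PySem.Dict.insert (⟨items⟩ : PySem.Dict Int (List (Int × Int))) i v = ⟨items ++ [(i, v)]⟩ := by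
  have hany : items.any (fun p => p.1 == i) = false := by
    simp only [List.any_eq_false]
    intro p hp
    simp [h p hp]
  simp [PySem.Dict.insert, PySem.Dict.contains, hany]

-- A's per-machine triple loop, at a fresh key, as its canonical result
lemma pv_stepA_eq (a0 a1 b0 b1 p0 p1 i : Int) (items : List (Int × List (Int × Int)))
    (h : ∀ p ∈ items, p.1 ≠ i) :
    (PySem.List.pyRange 1 101 1).foldl (fun d x =>
      (PySem.List.pyRange 1 101 1).foldl (fun d y =>
        if a0 * x + b0 * y == p0 then
          if a1 * x + b1 * y == p1 then
            PySem.Dict.modify d i [] (fun s => PySem.Set.add s (x, y))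
          else d
        else d) d) (⟨items⟩ : PySem.Dict Int (List (Int × Int)))
    = if (pvSols a0 a1 b0 b1 p0 p1).isEmpty then (⟨items⟩ : PySem.Dict Int (List (Int × Int)))
      else ⟨items ++ [(i, PySem.Set.ofList (pvSols a0 a1 b0 b1 p0 p1))]⟩ := by
  have hinner : ∀ (x : Int) (d : PySem.Dict Int (List (Int × Int))),
      (PySem.List.pyRange 1 101 1).foldl (fun d y =>
        if a0 * x + b0 * y == p0 then
          if a1 * x + b1 * y == p1 then
            PySem.Dict.modify d i [] (fun s => PySem.Set.add s (x, y))
          else d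
        else d) d
      = (pvSolutionsForX a0 a1 b0 b1 p0 p1 x).foldl
          (fun d el => PySem.Dict.modify d i [] (fun s => PySem.Set.add s el)) d := by
    intro x d
    rw [pv_foldl_if_if (PySem.List.pyRange 1 101 1)
          (fun y => a0 * x + b0 * y == p0) (fun y => a1 * x + b1 * y == p1)
          (fun d y => PySem.Dict.modify d i [] (fun s => PySem.Set.add s (x, y))) d,
        ← pv_cand a0 a1 b0 b1 p0 p1 x, List.foldl_map]
    rfl
  have hmid : (PySem.List.pyRange 1 101 1).foldl (fun d x =>
      (PySem.List.pyRange 1 101 1).foldl (fun d y =>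
        if a0 * x + b0 * y == p0 then
          if a1 * x + b1 * y == p1 then
            PySem.Dict.modify d i [] (fun s => PySem.Set.add s (x, y))
          else d
        else d) d) (⟨items⟩ : PySem.Dict Int (List (Int × Int)))
      = (pvSols a0 a1 b0 b1 p0 p1).foldl
          (fun d el => PySem.Dict.modify d i [] (fun s => PySem.Set.add s el)) ⟨items⟩ := by
    rw [show (fun (d : PySem.Dict Int (List (Int × Int))) (x : Int) =>
          (PySem.List.pyRange 1 101 1).foldl (fun d y =>
            if a0 * x + b0 * y == p0 then
              if a1 * x + b1 * y == p1 then
                PySem.Dict.modify d i [] (fun s => PySem.Set.add s (x, y))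
              else d
            else d) d)
        = (fun (d : PySem.Dict Int (List (Int × Int))) (x : Int) =>
            (pvSolutionsForX a0 a1 b0 b1 p0 p1 x).foldl
              (fun d el => PySem.Dict.modify d i [] (fun s => PySem.Set.add s el)) d)
      from funext fun d => funext fun x => hinner x d]
    exact pv_foldl_foldl_flatMap _ _ _ _
  rw [hmid, pv_modify_fold _ _ _ h, PySem.Set.ofList_eq_foldl]

-- B's per-machine body at a fresh key, same canonical result
lemma pv_stepB_eq (a0 a1 b0 b1 p0 p1 i : Int) (items : List (Int × List (Int × Int)))
    (h : ∀ p ∈ items, p.1 ≠ i) :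
    (if ((PySem.List.pyRange 1 101 1).foldl
          (fun sols x => sols ++ pvSolutionsForX a0 a1 b0 b1 p0 p1 x) []).isEmpty
     then (⟨items⟩ : PySem.Dict Int (List (Int × Int)))
     else PySem.Dict.insert ⟨items⟩ i (PySem.Set.ofList ((PySem.List.pyRange 1 101 1).foldl
          (fun sols x => sols ++ pvSolutionsForX a0 a1 b0 b1 p0 p1 x) [])))
    = if (pvSols a0 a1 b0 b1 p0 p1).isEmpty then (⟨items⟩ : PySem.Dict Int (List (Int × Int)))
      else ⟨items ++ [(i, PySem.Set.ofList (pvSols a0 a1 b0 b1 p0 p1))]⟩ := by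
  have hs : (PySem.List.pyRange 1 101 1).foldl
      (fun sols x => sols ++ pvSolutionsForX a0 a1 b0 b1 p0 p1 x) []
      = pvSols a0 a1 b0 b1 p0 p1 := by
    rw [PySem.List.foldl_append_eq_flatMap, List.nil_append, pvSols]
  rw [hs]
  by_cases hemp : (pvSols a0 a1 b0 b1 p0 p1).isEmpty = true
  · rw [if_pos hemp, if_pos hemp]
  · rw [if_neg hemp, if_neg hemp]
    exact pv_insert_fresh items i _ h


-- the whole fold over machines agrees: every key already present is below the next index
lemma pv_outer (a_button b_button prize : List (List Int)) (n : Int) :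
    ∀ (fuel : Nat) (k : Int) (items : List (Int × List (Int × Int))),
      (n - k).toNat = fuel → (∀ p ∈ items, p.1 < k) →
      (PySem.List.pyRange k n 1).foldl (fun d i =>
        (PySem.List.pyRange 1 101 1).foldl (fun d x =>
          (PySem.List.pyRange 1 101 1).foldl (fun d y =>
            if pvAt a_button i 0 * x + pvAt b_button i 0 * y == pvAt prize i 0 then
              if pvAt a_button i 1 * x + pvAt b_button i 1 * y == pvAt prize i 1 then
                PySem.Dict.modify d i [] (fun s => PySem.Set.add s (x, y))
              else d
            else d) d) d) (⟨items⟩ : PySem.Dict Int (List (Int × Int)))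
      = (PySem.List.pyRange k n 1).foldl (fun d i =>
          if ((PySem.List.pyRange 1 101 1).foldl
              (fun sols x => sols ++ pvSolutionsForX (pvAt a_button i 0) (pvAt a_button i 1)
                (pvAt b_button i 0) (pvAt b_button i 1) (pvAt prize i 0) (pvAt prize i 1) x) []).isEmpty
          then d
          else PySem.Dict.insert d i (PySem.Set.ofList ((PySem.List.pyRange 1 101 1).foldl
              (fun sols x => sols ++ pvSolutionsForX (pvAt a_button i 0) (pvAt a_button i 1)
                (pvAt b_button i 0) (pvAt b_button i 1) (pvAt prize i 0) (pvAt prize i 1) x) [])))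
          (⟨items⟩ : PySem.Dict Int (List (Int × Int))) := by
  intro fuel
  induction fuel with
  | zero =>
      intro k items hf h
      rw [PySem.List.pyRange_one_eq_nil (show n ≤ k by omega)]
      simp only [List.foldl_nil]
  | succ m ih =>
      intro k items hf h
      have hk : k < n := by omega
      have hfresh : ∀ p ∈ items, p.1 ≠ k := fun p hp => by have := h p hp; omega
      rw [PySem.List.pyRange_one_cons hk,
          List.foldl_cons, List.foldl_cons,
          pv_stepA_eq (pvAt a_button k 0) (pvAt a_button k 1) (pvAt b_button k 0)
            (pvAt b_button k 1) (pvAt prize k 0) (pvAt prize k 1) k items hfresh,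
          pv_stepB_eq (pvAt a_button k 0) (pvAt a_button k 1) (pvAt b_button k 0)
            (pvAt b_button k 1) (pvAt prize k 0) (pvAt prize k 1) k items hfresh]
      rcases Bool.eq_false_or_eq_true ((pvSols (pvAt a_button k 0) (pvAt a_button k 1)
          (pvAt b_button k 0) (pvAt b_button k 1) (pvAt prize k 0) (pvAt prize k 1)).isEmpty)
        with hemp | hemp
      · simp only [hemp, if_true]
        exact ih (k + 1) items (by omega) (fun p hp => by have := h p hp; omega)
      · simp only [hemp, Bool.false_eq_true, if_false]
        refine ih (k + 1) _ (by omega) ?_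
        intro p hp
        rcases List.mem_append.mp hp with h1 | h1
        · have := h p h1; omega
        · simp only [List.mem_singleton] at h1
          subst h1
          show k < k + 1
          omega

lemma pv_ports_eq (a_button b_button prize : List (List Int)) :
    check_valid_machines a_button b_button prize = check_valid_machines_alt a_button b_button prize := by
  unfold check_valid_machines check_valid_machines_alt
  have := pv_outer a_button b_button prize (PySem.List.len a_button)
      (PySem.List.len a_button - 0).toNat 0 [] rfl (by simp)
  exact congrArg PySem.Dict.items this

-- ===== VERDICT (by name: the statement is the Claim_ definition above) =====
theorem check_valid_machines_spec : Claim_equal_check_valid_machines := by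
  intro a_button b_button prize _ _
  unfold Spec_check_valid_machines
  exact pv_ports_eq a_button b_button prize
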